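-- pv_equiv track=rewrite | github.com/anushka9903/Flight-Radar-and-Weather-dashboard- | Backend/flight_radar/app/engines/weather_advisory.py | _evaluate_severity
-- ===== SOURCE A (Python) =====
-- def _evaluate_severity(warnings: list[str]) -> str:
--     high_triggers = {"Severe wind", "Very low visibility"}
--     medium_triggers = {"Heavy precipitation", "Dense cloud cover"}
--     for w in warnings:
--         if w in high_triggers:
--             return "HIGH"
--     for w in warnings:
--         if w in medium_triggers:
--             return "MEDIUM"
--     return "LOW"
-- ===== SOURCE B (Python) =====
-- def _evaluate_severity(warnings: list[str]) -> str:
--     high_triggers = {"Severe wind", "Very low visibility"}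
--     medium_triggers = {"Heavy precipitation", "Dense cloud cover"}
--     saw_medium = False
--     for w in warnings:
--         if w in high_triggers:
--             return "HIGH"
--         if w in medium_triggers:
--             saw_medium = True
--     return "MEDIUM" if saw_medium else "LOW"
-- ===== Notes on version B (the rewrite author's own statement) =====
-- stated objective: simpler
-- what changed: Replaces A's two separate scans of the list with a single pass that returns HIGH immediately and maintains a saw_medium flag, deciding MEDIUM/LOW after the loop.
import Mathlib
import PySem

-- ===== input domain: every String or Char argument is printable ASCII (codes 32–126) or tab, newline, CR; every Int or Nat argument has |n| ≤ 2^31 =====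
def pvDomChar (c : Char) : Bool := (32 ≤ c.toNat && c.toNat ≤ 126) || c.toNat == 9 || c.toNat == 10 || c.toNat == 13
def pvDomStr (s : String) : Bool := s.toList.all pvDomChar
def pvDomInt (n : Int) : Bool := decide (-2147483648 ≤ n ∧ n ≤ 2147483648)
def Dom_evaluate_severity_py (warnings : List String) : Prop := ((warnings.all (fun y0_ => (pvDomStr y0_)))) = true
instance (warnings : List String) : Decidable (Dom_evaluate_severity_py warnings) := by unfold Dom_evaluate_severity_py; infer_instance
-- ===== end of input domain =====

-- B is a single pass with an early HIGH return and a saw_medium flag, instead of A's two scans (objective: simpler).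

-- ===== PORT A =====
-- the two trigger sets (Python set literals; membership only, so a distinct-element list)
def pvHighTriggers : List String := ["Severe wind", "Very low visibility"]
def pvMediumTriggers : List String := ["Heavy precipitation", "Dense cloud cover"]

-- first for-loop of A: returns some "HIGH" at the first high trigger, none if the loop falls through
def pvLoopHigh : List String → Option String
  | [] => none
  | w :: t => if pvHighTriggers.contains w then some "HIGH" else pvLoopHigh t

-- second for-loop of A
def pvLoopMedium : List String → Option String
  | [] => none
  | w :: t => if pvMediumTriggers.contains w then some "MEDIUM" else pvLoopMedium t

def evaluate_severity_py (warnings : List String) : String :=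
  match pvLoopHigh warnings with
  | some r => r
  | none =>
    match pvLoopMedium warnings with
    | some r => r
    | none => "LOW"

-- ===== PORT B =====
-- the single loop of B, carrying the saw_medium flag
def pvLoopB : List String → Bool → String
  | [], sawMedium => if sawMedium then "MEDIUM" else "LOW"
  | w :: t, sawMedium =>
    if pvHighTriggers.contains w then "HIGH"
    else pvLoopB t (sawMedium || pvMediumTriggers.contains w)

def evaluate_severity_py_alt (warnings : List String) : String :=
  pvLoopB warnings false

-- ===== PRECONDITION & SPEC =====
def Spec_evaluate_severity_py (warnings : List String) (out : String) : Prop := out = evaluate_severity_py_alt warnings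
instance (warnings : List String) (out : String) : Decidable (Spec_evaluate_severity_py warnings out) := by unfold Spec_evaluate_severity_py; infer_instance

-- ===== CLAIM (what is proved, stated in full; the proofs are below) =====
def Claim_equal_evaluate_severity_py : Prop := ∀ (warnings : List String), Dom_evaluate_severity_py warnings → Spec_evaluate_severity_py warnings (evaluate_severity_py warnings)

-- ===== LEMMAS AND PROOFS =====

-- invariant of B's loop: one pass with the flag equals A's two-scan structure with the flag deciding the fallback
theorem pvLoopB_eq (ws : List String) (saw : Bool) :
    pvLoopB ws saw =
      match pvLoopHigh ws with
      | some r => r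
      | none =>
        if saw then "MEDIUM"
        else match pvLoopMedium ws with
          | some r => r
          | none => "LOW" := by
  induction ws generalizing saw with
  | nil => cases saw <;> simp [pvLoopB, pvLoopHigh, pvLoopMedium]
  | cons w t ih =>
    simp only [pvLoopB, pvLoopHigh, pvLoopMedium]
    by_cases hh : w ∈ pvHighTriggers <;> by_cases hm : w ∈ pvMediumTriggers <;>
      simp only [ih] <;> cases hH : pvLoopHigh t <;> cases saw <;> simp [hh, hm, hH]

-- ===== VERDICT (by name: the statement is the Claim_ definition above) =====
theorem evaluate_severity_py_spec : Claim_equal_evaluate_severity_py := by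
  intro ws _
  unfold Spec_evaluate_severity_py evaluate_severity_py evaluate_severity_py_alt
  rw [pvLoopB_eq]
  cases pvLoopHigh ws <;> simp
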